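-- pv_equiv track=rewrite | github.com/Kamal-Dhital/Kamal-Dhital | generate_stats.py | _generate_tech_stack_icons
-- ===== SOURCE A (Python) =====
-- def _generate_tech_stack_icons(languages):
--     """Generate technology stack icons based on used languages"""
--
--     # Language to icon mapping
--     tech_icons = {
--         'Python': 'https://img.shields.io/badge/Python-3776AB?style=for-the-badge&logo=python&logoColor=white',
--         'JavaScript': 'https://img.shields.io/badge/JavaScript-F7DF1E?style=for-the-badge&logo=javascript&logoColor=black',
--         'TypeScript': 'https://img.shields.io/badge/TypeScript-007ACC?style=for-the-badge&logo=typescript&logoColor=white',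
--         'Java': 'https://img.shields.io/badge/Java-ED8B00?style=for-the-badge&logo=openjdk&logoColor=white',
--         'C++': 'https://img.shields.io/badge/C%2B%2B-00599C?style=for-the-badge&logo=c%2B%2B&logoColor=white',
--         'C': 'https://img.shields.io/badge/C-00599C?style=for-the-badge&logo=c&logoColor=white',
--         'C#': 'https://img.shields.io/badge/C%23-239120?style=for-the-badge&logo=c-sharp&logoColor=white',
--         'Go': 'https://img.shields.io/badge/Go-00ADD8?style=for-the-badge&logo=go&logoColor=white',
--         'Rust': 'https://img.shields.io/badge/Rust-000000?style=for-the-badge&logo=rust&logoColor=white',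
--         'PHP': 'https://img.shields.io/badge/PHP-777BB4?style=for-the-badge&logo=php&logoColor=white',
--         'Ruby': 'https://img.shields.io/badge/Ruby-CC342D?style=for-the-badge&logo=ruby&logoColor=white',
--         'Swift': 'https://img.shields.io/badge/Swift-FA7343?style=for-the-badge&logo=swift&logoColor=white',
--         'Kotlin': 'https://img.shields.io/badge/Kotlin-0095D5?style=for-the-badge&logo=kotlin&logoColor=white',
--         'Dart': 'https://img.shields.io/badge/Dart-0175C2?style=for-the-badge&logo=dart&logoColor=white',
--         'R': 'https://img.shields.io/badge/R-276DC3?style=for-the-badge&logo=r&logoColor=white',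
--         'Scala': 'https://img.shields.io/badge/Scala-DC322F?style=for-the-badge&logo=scala&logoColor=white',
--         'Shell': 'https://img.shields.io/badge/Shell_Script-121011?style=for-the-badge&logo=gnu-bash&logoColor=white',
--         'HTML': 'https://img.shields.io/badge/HTML5-E34F26?style=for-the-badge&logo=html5&logoColor=white',
--         'CSS': 'https://img.shields.io/badge/CSS3-1572B6?style=for-the-badge&logo=css3&logoColor=white',
--         'Vue': 'https://img.shields.io/badge/Vue.js-35495E?style=for-the-badge&logo=vue.js&logoColor=4FC08D',
--         'React': 'https://img.shields.io/badge/React-20232A?style=for-the-badge&logo=react&logoColor=61DAFB',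
--         'Angular': 'https://img.shields.io/badge/Angular-DD0031?style=for-the-badge&logo=angular&logoColor=white',
--         'SCSS': 'https://img.shields.io/badge/SASS-hotpink.svg?style=for-the-badge&logo=SASS&logoColor=white',
--         'Less': 'https://img.shields.io/badge/less-2B4C80?style=for-the-badge&logo=less&logoColor=white',
--         'Jupyter Notebook': 'https://img.shields.io/badge/jupyter-%23FA0F00.svg?style=for-the-badge&logo=jupyter&logoColor=white'
--     }
--
--     # Get icons for languages the user actually uses
--     used_icons = []
--     for lang in languages.keys():
--         if lang in tech_icons:
--             used_icons.append(f"![{lang}]({tech_icons[lang]})")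
--
--     # If no matching languages, show common tech stack
--     if not used_icons:
--         common_icons = [
--             "![Python](https://img.shields.io/badge/Python-3776AB?style=for-the-badge&logo=python&logoColor=white)",
--             "![JavaScript](https://img.shields.io/badge/JavaScript-F7DF1E?style=for-the-badge&logo=javascript&logoColor=black)",
--             "![HTML5](https://img.shields.io/badge/HTML5-E34F26?style=for-the-badge&logo=html5&logoColor=white)",
--             "![CSS3](https://img.shields.io/badge/CSS3-1572B6?style=for-the-badge&logo=css3&logoColor=white)"
--         ]
--         return ' '.join(common_icons)
--
--     # Arrange icons in rows of 6
--     rows = [used_icons[i:i+6] for i in range(0, len(used_icons), 6)]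
--     return '\n\n'.join(' '.join(row) for row in rows)
-- ===== SOURCE B (Python) =====
-- def _generate_tech_stack_icons(languages):
--     """Generate technology stack icons based on used languages"""
--
--     tech_icons = {
--         'Python': 'https://img.shields.io/badge/Python-3776AB?style=for-the-badge&logo=python&logoColor=white',
--         'JavaScript': 'https://img.shields.io/badge/JavaScript-F7DF1E?style=for-the-badge&logo=javascript&logoColor=black',
--         'TypeScript': 'https://img.shields.io/badge/TypeScript-007ACC?style=for-the-badge&logo=typescript&logoColor=white',
--         'Java': 'https://img.shields.io/badge/Java-ED8B00?style=for-the-badge&logo=openjdk&logoColor=white',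
--         'C++': 'https://img.shields.io/badge/C%2B%2B-00599C?style=for-the-badge&logo=c%2B%2B&logoColor=white',
--         'C': 'https://img.shields.io/badge/C-00599C?style=for-the-badge&logo=c&logoColor=white',
--         'C#': 'https://img.shields.io/badge/C%23-239120?style=for-the-badge&logo=c-sharp&logoColor=white',
--         'Go': 'https://img.shields.io/badge/Go-00ADD8?style=for-the-badge&logo=go&logoColor=white',
--         'Rust': 'https://img.shields.io/badge/Rust-000000?style=for-the-badge&logo=rust&logoColor=white',
--         'PHP': 'https://img.shields.io/badge/PHP-777BB4?style=for-the-badge&logo=php&logoColor=white',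
--         'Ruby': 'https://img.shields.io/badge/Ruby-CC342D?style=for-the-badge&logo=ruby&logoColor=white',
--         'Swift': 'https://img.shields.io/badge/Swift-FA7343?style=for-the-badge&logo=swift&logoColor=white',
--         'Kotlin': 'https://img.shields.io/badge/Kotlin-0095D5?style=for-the-badge&logo=kotlin&logoColor=white',
--         'Dart': 'https://img.shields.io/badge/Dart-0175C2?style=for-the-badge&logo=dart&logoColor=white',
--         'R': 'https://img.shields.io/badge/R-276DC3?style=for-the-badge&logo=r&logoColor=white',
--         'Scala': 'https://img.shields.io/badge/Scala-DC322F?style=for-the-badge&logo=scala&logoColor=white',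
--         'Shell': 'https://img.shields.io/badge/Shell_Script-121011?style=for-the-badge&logo=gnu-bash&logoColor=white',
--         'HTML': 'https://img.shields.io/badge/HTML5-E34F26?style=for-the-badge&logo=html5&logoColor=white',
--         'CSS': 'https://img.shields.io/badge/CSS3-1572B6?style=for-the-badge&logo=css3&logoColor=white',
--         'Vue': 'https://img.shields.io/badge/Vue.js-35495E?style=for-the-badge&logo=vue.js&logoColor=4FC08D',
--         'React': 'https://img.shields.io/badge/React-20232A?style=for-the-badge&logo=react&logoColor=61DAFB',
--         'Angular': 'https://img.shields.io/badge/Angular-DD0031?style=for-the-badge&logo=angular&logoColor=white',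
--         'SCSS': 'https://img.shields.io/badge/SASS-hotpink.svg?style=for-the-badge&logo=SASS&logoColor=white',
--         'Less': 'https://img.shields.io/badge/less-2B4C80?style=for-the-badge&logo=less&logoColor=white',
--         'Jupyter Notebook': 'https://img.shields.io/badge/jupyter-%23FA0F00.svg?style=for-the-badge&logo=jupyter&logoColor=white'
--     }
--
--     # matching icons, in input order, via a comprehension
--     used_icons = [f"![{lang}]({tech_icons[lang]})" for lang in languages if lang in tech_icons]
--
--     if not used_icons:
--         return ("![Python](https://img.shields.io/badge/Python-3776AB?style=for-the-badge&logo=python&logoColor=white)"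
--                 " ![JavaScript](https://img.shields.io/badge/JavaScript-F7DF1E?style=for-the-badge&logo=javascript&logoColor=black)"
--                 " ![HTML5](https://img.shields.io/badge/HTML5-E34F26?style=for-the-badge&logo=html5&logoColor=white)"
--                 " ![CSS3](https://img.shields.io/badge/CSS3-1572B6?style=for-the-badge&logo=css3&logoColor=white)")
--
--     # single pass: emit the right separator before each icon instead of slicing rows of 6
--     parts = []
--     for i, icon in enumerate(used_icons):
--         if i > 0:
--             parts.append('\n\n' if i % 6 == 0 else ' ')
--         parts.append(icon)
--     return ''.join(parts)
-- ===== Notes on version B (the rewrite author's own statement) =====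
-- stated objective: simpler
-- what changed: Replaces the rows-of-6 slicing (range/slice comprehension) plus nested '\n\n'/' ' joins by one indexed pass that emits the right separator before each icon, and builds used_icons with a comprehension over a dict lookup instead of an explicit append loop.
import Mathlib
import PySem

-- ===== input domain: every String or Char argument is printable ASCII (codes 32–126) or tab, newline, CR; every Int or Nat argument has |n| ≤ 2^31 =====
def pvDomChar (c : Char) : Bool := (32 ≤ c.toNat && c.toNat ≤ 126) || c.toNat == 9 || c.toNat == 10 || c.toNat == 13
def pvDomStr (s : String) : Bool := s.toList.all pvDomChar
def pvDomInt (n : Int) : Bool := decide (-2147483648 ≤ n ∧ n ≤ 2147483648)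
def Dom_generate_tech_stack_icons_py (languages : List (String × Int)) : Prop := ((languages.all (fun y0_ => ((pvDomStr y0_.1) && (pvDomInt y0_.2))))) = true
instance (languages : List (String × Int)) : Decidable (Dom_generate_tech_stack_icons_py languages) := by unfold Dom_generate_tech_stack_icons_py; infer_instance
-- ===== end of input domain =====

-- B replaces A's rows-of-6 slicing plus nested joins by a single indexed pass that emits
-- the correct separator before each icon (objective: simpler single-pass assembly, same cost).

-- shared constant: the language → badge-URL table both versions consult
def pvTechIcons : PySem.Dict String String := PySem.Dict.ofList [
  ("Python", "https://img.shields.io/badge/Python-3776AB?style=for-the-badge&logo=python&logoColor=white"),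
  ("JavaScript", "https://img.shields.io/badge/JavaScript-F7DF1E?style=for-the-badge&logo=javascript&logoColor=black"),
  ("TypeScript", "https://img.shields.io/badge/TypeScript-007ACC?style=for-the-badge&logo=typescript&logoColor=white"),
  ("Java", "https://img.shields.io/badge/Java-ED8B00?style=for-the-badge&logo=openjdk&logoColor=white"),
  ("C++", "https://img.shields.io/badge/C%2B%2B-00599C?style=for-the-badge&logo=c%2B%2B&logoColor=white"),
  ("C", "https://img.shields.io/badge/C-00599C?style=for-the-badge&logo=c&logoColor=white"),
  ("C#", "https://img.shields.io/badge/C%23-239120?style=for-the-badge&logo=c-sharp&logoColor=white"),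
  ("Go", "https://img.shields.io/badge/Go-00ADD8?style=for-the-badge&logo=go&logoColor=white"),
  ("Rust", "https://img.shields.io/badge/Rust-000000?style=for-the-badge&logo=rust&logoColor=white"),
  ("PHP", "https://img.shields.io/badge/PHP-777BB4?style=for-the-badge&logo=php&logoColor=white"),
  ("Ruby", "https://img.shields.io/badge/Ruby-CC342D?style=for-the-badge&logo=ruby&logoColor=white"),
  ("Swift", "https://img.shields.io/badge/Swift-FA7343?style=for-the-badge&logo=swift&logoColor=white"),
  ("Kotlin", "https://img.shields.io/badge/Kotlin-0095D5?style=for-the-badge&logo=kotlin&logoColor=white"),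
  ("Dart", "https://img.shields.io/badge/Dart-0175C2?style=for-the-badge&logo=dart&logoColor=white"),
  ("R", "https://img.shields.io/badge/R-276DC3?style=for-the-badge&logo=r&logoColor=white"),
  ("Scala", "https://img.shields.io/badge/Scala-DC322F?style=for-the-badge&logo=scala&logoColor=white"),
  ("Shell", "https://img.shields.io/badge/Shell_Script-121011?style=for-the-badge&logo=gnu-bash&logoColor=white"),
  ("HTML", "https://img.shields.io/badge/HTML5-E34F26?style=for-the-badge&logo=html5&logoColor=white"),
  ("CSS", "https://img.shields.io/badge/CSS3-1572B6?style=for-the-badge&logo=css3&logoColor=white"),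
  ("Vue", "https://img.shields.io/badge/Vue.js-35495E?style=for-the-badge&logo=vue.js&logoColor=4FC08D"),
  ("React", "https://img.shields.io/badge/React-20232A?style=for-the-badge&logo=react&logoColor=61DAFB"),
  ("Angular", "https://img.shields.io/badge/Angular-DD0031?style=for-the-badge&logo=angular&logoColor=white"),
  ("SCSS", "https://img.shields.io/badge/SASS-hotpink.svg?style=for-the-badge&logo=SASS&logoColor=white"),
  ("Less", "https://img.shields.io/badge/less-2B4C80?style=for-the-badge&logo=less&logoColor=white"),
  ("Jupyter Notebook", "https://img.shields.io/badge/jupyter-%23FA0F00.svg?style=for-the-badge&logo=jupyter&logoColor=white")]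

-- ===== PORT A =====
-- for lang in languages.keys(): if lang in tech_icons: used_icons.append(f"![{lang}]({tech_icons[lang]})")
-- rows = [used_icons[i:i+6] for i in range(0, len(used_icons), 6)]; '\n\n'.join(' '.join(row) ...)
def generate_tech_stack_icons_py (languages : List (String × Int)) : String :=
  let used_icons : List String := languages.foldl
    (fun acc p =>
      if PySem.Dict.contains pvTechIcons p.1 then
        acc ++ ["![" ++ p.1 ++ "](" ++ PySem.Dict.getD pvTechIcons p.1 "" ++ ")"]
      else acc) []
  if used_icons = [] then
    PySem.Str.join " "
      ["![Python](https://img.shields.io/badge/Python-3776AB?style=for-the-badge&logo=python&logoColor=white)",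
       "![JavaScript](https://img.shields.io/badge/JavaScript-F7DF1E?style=for-the-badge&logo=javascript&logoColor=black)",
       "![HTML5](https://img.shields.io/badge/HTML5-E34F26?style=for-the-badge&logo=html5&logoColor=white)",
       "![CSS3](https://img.shields.io/badge/CSS3-1572B6?style=for-the-badge&logo=css3&logoColor=white)"]
  else
    let rows : List (List String) :=
      (PySem.List.pyRange 0 (used_icons.length : Int) 6).map
        (fun i => PySem.List.slice used_icons (some i) (some (i + 6)))
    PySem.Str.join "\n\n" (rows.map (fun row => PySem.Str.join " " row))

-- ===== PORT B =====
-- used_icons by comprehension; then a single enumerated pass appends the separator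
-- ('\n\n' at multiples of 6, ' ' otherwise, nothing first) and the icon; ''.join at the end
def generate_tech_stack_icons_py_alt (languages : List (String × Int)) : String :=
  let used_icons : List String := languages.filterMap
    (fun p => (PySem.Dict.get? pvTechIcons p.1).map
      (fun url => "![" ++ p.1 ++ "](" ++ url ++ ")"))
  if used_icons = [] then
    "![Python](https://img.shields.io/badge/Python-3776AB?style=for-the-badge&logo=python&logoColor=white) ![JavaScript](https://img.shields.io/badge/JavaScript-F7DF1E?style=for-the-badge&logo=javascript&logoColor=black) ![HTML5](https://img.shields.io/badge/HTML5-E34F26?style=for-the-badge&logo=html5&logoColor=white) ![CSS3](https://img.shields.io/badge/CSS3-1572B6?style=for-the-badge&logo=css3&logoColor=white)"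
  else
    let parts : List String := (PySem.List.enumerate used_icons).foldl
      (fun out pr =>
        (if pr.1 > 0 then out ++ [if PySem.Int.mod pr.1 6 == 0 then "\n\n" else " "] else out)
          ++ [pr.2]) []
    PySem.Str.join "" parts

-- ===== PRECONDITION & SPEC =====
def Spec_generate_tech_stack_icons_py (languages : List (String × Int)) (out : String) : Prop := out = generate_tech_stack_icons_py_alt languages
instance (languages : List (String × Int)) (out : String) : Decidable (Spec_generate_tech_stack_icons_py languages out) := by unfold Spec_generate_tech_stack_icons_py; infer_instance

-- ===== CLAIM (what is proved, stated in full; the proofs are below) =====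
def Claim_equal_generate_tech_stack_icons_py : Prop := ∀ (languages : List (String × Int)), Dom_generate_tech_stack_icons_py languages → Spec_generate_tech_stack_icons_py languages (generate_tech_stack_icons_py languages)

-- ===== LEMMAS AND PROOFS =====

-- the two ways of collecting the matching badges agree
theorem pv_used_eq (ls : List (String × Int)) (acc : List String) :
    ls.foldl (fun acc p =>
      if PySem.Dict.contains pvTechIcons p.1 then
        acc ++ ["![" ++ p.1 ++ "](" ++ PySem.Dict.getD pvTechIcons p.1 "" ++ ")"]
      else acc) acc
    = acc ++ ls.filterMap (fun p => (PySem.Dict.get? pvTechIcons p.1).map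
        (fun url => "![" ++ p.1 ++ "](" ++ url ++ ")")) := by
  induction ls generalizing acc with
  | nil => simp
  | cons p t ih =>
    simp only [List.foldl_cons, List.filterMap_cons]
    rcases hg : PySem.Dict.get? pvTechIcons p.1 with _ | url
    · rw [PySem.Dict.contains_eq_isSome_get?, hg]
      simp [ih]
    · rw [PySem.Dict.contains_eq_isSome_get?, hg,
        PySem.Dict.getD_of_get?_eq_some pvTechIcons "" hg]
      simp [ih]

-- the per-element piece list of B's single pass
def pvH (pr : Int × String) : List String :=
  (if pr.1 > 0 then [if PySem.Int.mod pr.1 6 == 0 then "\n\n" else " "] else []) ++ [pr.2]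

theorem pv_foldl_parts (l : List (Int × String)) (acc : List String) :
    l.foldl (fun out pr =>
      (if pr.1 > 0 then out ++ [if PySem.Int.mod pr.1 6 == 0 then "\n\n" else " "] else out)
        ++ [pr.2]) acc = acc ++ l.flatMap pvH := by
  induction l generalizing acc with
  | nil => simp
  | cons pr t ih =>
    simp only [List.foldl_cons, List.flatMap_cons, ih, pvH]
    split <;> simp

-- a row interleaved with single spaces
def pvSepSp : List String → List String
  | [] => []
  | a :: t => a :: t.flatMap (fun x => [" ", x])

-- rows of six
def pvChunk6 (l : List String) : List (List String) :=
  if h : l = [] then [] else l.take 6 :: pvChunk6 (l.drop 6)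
termination_by l.length
decreasing_by
  simp only [List.length_drop]
  have := List.length_pos_iff.mpr h
  omega

-- the full piece list produced by B's pass, chunk-structured; m counts earlier chunks
def pvFlat (l : List String) (m : Nat) : List String :=
  if _h : l = [] then [] else
    (if m = 0 then [] else ["\n\n"]) ++ pvSepSp (l.take 6) ++ pvFlat (l.drop 6) (m + 1)
termination_by l.length
decreasing_by
  simp only [List.length_drop]
  have := List.length_pos_iff.mpr _h
  omega

theorem pv_inner (t : List String) (m j : Nat) (h1 : 1 ≤ j) (h2 : j + t.length ≤ 6) :
    (PySem.List.enumerate t (6 * (m : Int) + (j : Int))).flatMap pvH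
      = t.flatMap (fun x => [" ", x]) := by
  induction t generalizing j with
  | nil => simp [PySem.List.enumerate]
  | cons x t ih =>
    rw [PySem.List.enumerate_cons]
    simp only [List.flatMap_cons, pvH]
    have hpos : (0 : Int) < 6 * (m : Int) + (j : Int) := by
      have : (1 : Int) ≤ (j : Int) := by exact_mod_cast h1
      positivity
    have hmod : (PySem.Int.mod (6 * (m : Int) + (j : Int)) 6 == 0) = false := by
      have hj5 : j ≤ 5 := by simp at h2; omega
      simp only [PySem.Int.mod, Int.fmod_eq_emod, beq_eq_false_iff_ne, ne_eq]
      split <;> omega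
    rw [if_pos hpos, hmod]
    have hst : 6 * (m : Int) + (j : Int) + 1 = 6 * (m : Int) + ((j + 1 : Nat) : Int) := by
      push_cast; ring
    rw [hst, ih (j + 1) (by omega) (by simp at h2 ⊢; omega)]
    simp

theorem pv_chunk (c : List String) (m : Nat) (hne : c ≠ []) (hle : c.length ≤ 6) :
    (PySem.List.enumerate c (6 * (m : Int))).flatMap pvH
      = (if m = 0 then [] else ["\n\n"]) ++ pvSepSp c := by
  rcases c with _ | ⟨a, t⟩
  · exact absurd rfl hne
  rw [PySem.List.enumerate_cons]
  simp only [List.flatMap_cons, pvH, pvSepSp]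
  have hst : 6 * (m : Int) + 1 = 6 * (m : Int) + ((1 : Nat) : Int) := by norm_num
  rw [hst, pv_inner t m 1 le_rfl (by simp at hle; omega)]
  by_cases hm : m = 0
  · subst hm; simp
  · have hpos : (0 : Int) < 6 * (m : Int) := by
      have : 1 ≤ m := Nat.one_le_iff_ne_zero.mpr hm
      positivity
    have hmod : (PySem.Int.mod (6 * (m : Int)) 6 == 0) = true := by
      simp only [PySem.Int.mod, Int.fmod_eq_emod, beq_iff_eq]
      split <;> omega
    rw [if_pos hpos, hmod]
    simp [hm]

theorem pv_flat_eq (l : List String) (m : Nat) :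
    (PySem.List.enumerate l (6 * (m : Int))).flatMap pvH = pvFlat l m := by
  by_cases h : l = []
  · subst h; simp [pvFlat, PySem.List.enumerate]
  · rw [pvFlat]
    simp only [h, dif_neg, not_false_iff]
    conv_lhs => rw [← List.take_append_drop 6 l]
    rw [PySem.List.enumerate_append, List.flatMap_append]
    have htne : l.take 6 ≠ [] := by
      simp [List.take_eq_nil_iff, h]
    rw [pv_chunk (l.take 6) m htne (by simp)]
    by_cases h6 : l.drop 6 = []
    · rw [h6]
      simp [pvFlat, PySem.List.enumerate]
    · have hlen : (l.take 6).length = 6 := by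
        have : 6 < l.length ∨ l.length ≤ 6 := by omega
        rcases this with h' | h'
        · simp [List.length_take]; omega
        · exact absurd (by simp [List.drop_eq_nil_iff]; omega) h6
      have hst : 6 * (m : Int) + ((l.take 6).length : Int) = 6 * ((m + 1 : Nat) : Int) := by
        rw [hlen]; push_cast; ring
      rw [hst, pv_flat_eq (l.drop 6) (m + 1)]
termination_by l.length
decreasing_by
  simp only [List.length_drop]
  have := List.length_pos_iff.mpr h
  omega

-- String-level join equations (proved through the Chars layer)
theorem pv_sjoin_nil (sep : String) : PySem.Str.join sep [] = "" := by
  apply String.toList_inj.mp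
  simp [PySem.Str.toList_join, PySem.Chars.join_nil]

theorem pv_sjoin_singleton (sep a : String) : PySem.Str.join sep [a] = a := by
  apply String.toList_inj.mp
  simp [PySem.Str.toList_join, PySem.Chars.join_singleton]

theorem pv_sjoin_cons_cons (sep a b : String) (t : List String) :
    PySem.Str.join sep (a :: b :: t) = a ++ sep ++ PySem.Str.join sep (b :: t) := by
  apply String.toList_inj.mp
  simp [PySem.Str.toList_join, PySem.Chars.join_cons_cons]

theorem pv_sjoin_empty_cons (a : String) (t : List String) :
    PySem.Str.join "" (a :: t) = a ++ PySem.Str.join "" t := by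
  rcases t with _ | ⟨b, t⟩
  · rw [pv_sjoin_singleton, pv_sjoin_nil]; simp
  · rw [pv_sjoin_cons_cons]; simp

theorem pv_sjoin_empty_append (xs ys : List String) :
    PySem.Str.join "" (xs ++ ys) = PySem.Str.join "" xs ++ PySem.Str.join "" ys := by
  induction xs with
  | nil => simp [pv_sjoin_nil]
  | cons a t ih => simp [pv_sjoin_empty_cons, ih, String.append_assoc]

theorem pv_sjoin_sepSp (c : List String) : PySem.Str.join "" (pvSepSp c) = PySem.Str.join " " c := by
  rcases c with _ | ⟨a, t⟩
  · simp only [pvSepSp]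
    rw [pv_sjoin_nil, pv_sjoin_nil]
  induction t generalizing a with
  | nil => simp [pvSepSp, pv_sjoin_singleton]
  | cons b t ih =>
    have : pvSepSp (a :: b :: t) = a :: " " :: pvSepSp (b :: t) := by simp [pvSepSp]
    rw [this, pv_sjoin_empty_cons, pv_sjoin_empty_cons, ih b, pv_sjoin_cons_cons]
    simp [String.append_assoc]

theorem pv_chunk6_ne_nil (l : List String) (h : l ≠ []) : pvChunk6 l ≠ [] := by
  rw [pvChunk6]; simp [h]

theorem pv_join_flat (l : List String) (m : Nat) (h : l ≠ []) :
    PySem.Str.join "" (pvFlat l m)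
      = (if m = 0 then "" else "\n\n")
        ++ PySem.Str.join "\n\n" ((pvChunk6 l).map (PySem.Str.join " ")) := by
  rw [pvFlat, pvChunk6]
  simp only [h, dif_neg, not_false_iff]
  rw [pv_sjoin_empty_append, pv_sjoin_empty_append, pv_sjoin_sepSp]
  have hpre : PySem.Str.join "" (if m = 0 then ([] : List String) else ["\n\n"])
      = (if m = 0 then "" else "\n\n") := by
    split <;> simp [pv_sjoin_nil, pv_sjoin_singleton]
  rw [hpre]
  by_cases h6 : l.drop 6 = []
  · rw [h6]
    simp [pvChunk6, pvFlat, pv_sjoin_nil, pv_sjoin_singleton]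
  · rw [pv_join_flat (l.drop 6) (m + 1) h6]
    simp only [Nat.succ_ne_zero, if_false]
    rcases hc : (pvChunk6 (l.drop 6)).map (PySem.Str.join " ") with _ | ⟨q, qs⟩
    · exact absurd (List.map_eq_nil_iff.mp hc) (pv_chunk6_ne_nil _ h6)
    · rw [List.map_cons, hc, pv_sjoin_cons_cons]
      simp [String.append_assoc]
termination_by l.length
decreasing_by
  simp only [List.length_drop]
  have := List.length_pos_iff.mpr h
  omega

-- A's range/slice rows in closed Nat form
theorem pv_rows_range (l : List String) :
    (PySem.List.pyRange 0 (l.length : Int) 6).map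
        (fun i => PySem.List.slice l (some i) (some (i + 6)))
      = (List.range ((l.length + 5) / 6)).map (fun k => (l.drop (6 * k)).take 6) := by
  rw [PySem.List.pyRange_of_pos 0 (l.length : Int) (by norm_num), List.map_map]
  have hlen : (if (0 : Int) < (l.length : Int)
      then (((l.length : Int) - 0 + 6 - 1) / 6).toNat else 0) = (l.length + 5) / 6 := by
    split
    · omega
    · omega
  rw [hlen]
  apply List.map_congr_left
  intro k _
  simp only [Function.comp]
  have h1 : (0 : Int) + 6 * (k : Int) = ((6 * k : Nat) : Int) := by push_cast; ring
  have h2 : ((6 * k : Nat) : Int) + 6 = ((6 * k + 6 : Nat) : Int) := by push_cast; ring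
  rw [h1, h2]
  rw [PySem.List.slice_toNat l (by positivity) (by positivity)]
  simp only [Int.toNat_natCast]
  rw [show 6 * k + 6 - 6 * k = 6 from by omega]

theorem pv_chunk_range (l : List String) :
    (List.range ((l.length + 5) / 6)).map (fun k => (l.drop (6 * k)).take 6) = pvChunk6 l := by
  by_cases h : l = []
  · subst h; simp [pvChunk6]
  · rw [pvChunk6]
    simp only [h, dif_neg, not_false_iff]
    have hpos : 0 < l.length := List.length_pos_iff.mpr h
    have hM : (l.length + 5) / 6 = ((l.drop 6).length + 5) / 6 + 1 := by
      simp only [List.length_drop]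
      omega
    rw [hM, List.range_succ_eq_map, List.map_cons]
    simp only [Nat.mul_zero, List.drop_zero, List.map_map]
    congr 1
    rw [← pv_chunk_range (l.drop 6)]
    apply List.map_congr_left
    intro k _
    simp only [Function.comp]
    rw [List.drop_drop]
    congr 2
    omega
termination_by l.length
decreasing_by
  simp only [List.length_drop]
  have := List.length_pos_iff.mpr h
  omega

-- ===== VERDICT (by name: the statement is the Claim_ definition above) =====
set_option maxRecDepth 40000 in
theorem generate_tech_stack_icons_py_spec : Claim_equal_generate_tech_stack_icons_py := by
  unfold Claim_equal_generate_tech_stack_icons_py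
  intro languages _
  unfold Spec_generate_tech_stack_icons_py
  unfold generate_tech_stack_icons_py generate_tech_stack_icons_py_alt
  simp only [pv_used_eq languages [], List.nil_append]
  set used := languages.filterMap (fun p => (PySem.Dict.get? pvTechIcons p.1).map
    (fun url => "![" ++ p.1 ++ "](" ++ url ++ ")")) with hused
  by_cases h : used = []
  · simp only [h, if_true]
    decide
  · simp only [h, if_neg, not_false_iff]
    rw [pv_foldl_parts, List.nil_append]
    have h0 : PySem.List.enumerate used 0 = PySem.List.enumerate used (6 * ((0 : Nat) : Int)) := by
      norm_num
    rw [h0, pv_flat_eq used 0, pv_join_flat used 0 h]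
    rw [pv_rows_range used, pv_chunk_range used]
    simp
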